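-- pv_equiv track=rewrite | github.com/beyondelastic/agentic-form-filler | src/tools/semantic_data_extractor.py | _enhance_field_context
-- ===== SOURCE A (Python) =====
-- from typing import Dict, Any, List, Optional, Tuple
--
-- def _enhance_field_context(
--
--     field_name: str,
--     field_type: str,
--     original_context: str,
--     description: Optional[str]
-- ) -> str:
--     """Enhance field context with semantic understanding."""
--
--     # Add semantic context based on field name and type
--     semantic_hints = []
--
--     # Name-based semantic hints
--     name_lower = field_name.lower()
--     if any(word in name_lower for word in ['name', 'namen', 'vorname', 'nachname']):
--         semantic_hints.append("Look for person names, first/last names")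
--     elif any(word in name_lower for word in ['geburt', 'birth', 'geboren']):
--         semantic_hints.append("Look for birth dates, date of birth")
--     elif any(word in name_lower for word in ['staat', 'national', 'citizenship']):
--         semantic_hints.append("Look for nationality, citizenship, country names")
--     elif any(word in name_lower for word in ['arbeitgeber', 'employer', 'company', 'firma']):
--         semantic_hints.append("Look for employer/company names and information")
--     elif any(word in name_lower for word in ['adresse', 'address', 'wohnort']):
--         semantic_hints.append("Look for addresses, locations, postal codes")
--     elif any(word in name_lower for word in ['telefon', 'phone', 'handy']):
--         semantic_hints.append("Look for phone numbers, mobile numbers")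
--     elif any(word in name_lower for word in ['email', 'e-mail', 'mail']):
--         semantic_hints.append("Look for email addresses")
--     elif any(word in name_lower for word in ['beruf', 'job', 'position', 'titel']):
--         semantic_hints.append("Look for job titles, professions, positions")
--
--     # Type-based semantic hints
--     if field_type == 'date':
--         semantic_hints.append("Dates in formats: DD.MM.YYYY, DD/MM/YYYY, YYYY-MM-DD")
--     elif field_type == 'number':
--         semantic_hints.append("Numeric values, amounts, quantities")
--     elif field_type == 'email':
--         semantic_hints.append("Email addresses with @ symbol")
--     elif field_type == 'phone':
--         semantic_hints.append("Phone numbers with country/area codes")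
--
--     # Combine all context
--     contexts = [original_context]
--     if description:
--         contexts.append(f"Description: {description}")
--     if semantic_hints:
--         contexts.append(f"Semantic hints: {', '.join(semantic_hints)}")
--
--     return " | ".join(filter(None, contexts))
-- ===== SOURCE B (Python) =====
-- from typing import Optional
--
-- # flat keyword -> priority map (lower number = higher priority), one hint per priority
-- _KW_PRIORITY = {
--     'name': 0, 'namen': 0, 'vorname': 0, 'nachname': 0,
--     'geburt': 1, 'birth': 1, 'geboren': 1,
--     'staat': 2, 'national': 2, 'citizenship': 2,
--     'arbeitgeber': 3, 'employer': 3, 'company': 3, 'firma': 3,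
--     'adresse': 4, 'address': 4, 'wohnort': 4,
--     'telefon': 5, 'phone': 5, 'handy': 5,
--     'email': 6, 'e-mail': 6, 'mail': 6,
--     'beruf': 7, 'job': 7, 'position': 7, 'titel': 7,
-- }
-- _PRIORITY_HINT = [
--     "Look for person names, first/last names",
--     "Look for birth dates, date of birth",
--     "Look for nationality, citizenship, country names",
--     "Look for employer/company names and information",
--     "Look for addresses, locations, postal codes",
--     "Look for phone numbers, mobile numbers",
--     "Look for email addresses",
--     "Look for job titles, professions, positions",
-- ]
-- _TYPE_HINT = {
--     'date': "Dates in formats: DD.MM.YYYY, DD/MM/YYYY, YYYY-MM-DD",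
--     'number': "Numeric values, amounts, quantities",
--     'email': "Email addresses with @ symbol",
--     'phone': "Phone numbers with country/area codes",
-- }
--
--
-- def _best_hint(matched):
--     """Hint of the highest-priority (minimal) matched keyword, as a 0/1-element list."""
--     return [_PRIORITY_HINT[min(matched)]] if matched else []
--
--
-- def _enhance_field_context(
--     field_name: str,
--     field_type: str,
--     original_context: str,
--     description: Optional[str]
-- ) -> str:
--     """Enhance field context: collect ALL keyword hits at once, keep the
--     highest-priority one via min(), and build the result string incrementally."""
--     name_lower = field_name.lower()
--     matched = [p for kw, p in _KW_PRIORITY.items() if kw in name_lower]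
--     hints = _best_hint(matched)
--     type_hint = _TYPE_HINT.get(field_type)
--     if type_hint is not None:
--         hints.append(type_hint)
--
--     result = original_context
--     if description:
--         result = result + " | Description: " + description if result else "Description: " + description
--     if hints:
--         tail = "Semantic hints: " + ", ".join(hints)
--         result = result + " | " + tail if result else tail
--     return result
-- ===== Notes on version B (the rewrite author's own statement) =====
-- stated objective: alternative
-- what changed: Instead of A's eight-branch first-match elif ladder, B collects ALL matching keywords from one flat keyword->priority map in a single comprehension and selects the hint of the minimal priority via min(); the type hint becomes a dict lookup and the final string is built incrementally instead of join-over-filter.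
import Mathlib
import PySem

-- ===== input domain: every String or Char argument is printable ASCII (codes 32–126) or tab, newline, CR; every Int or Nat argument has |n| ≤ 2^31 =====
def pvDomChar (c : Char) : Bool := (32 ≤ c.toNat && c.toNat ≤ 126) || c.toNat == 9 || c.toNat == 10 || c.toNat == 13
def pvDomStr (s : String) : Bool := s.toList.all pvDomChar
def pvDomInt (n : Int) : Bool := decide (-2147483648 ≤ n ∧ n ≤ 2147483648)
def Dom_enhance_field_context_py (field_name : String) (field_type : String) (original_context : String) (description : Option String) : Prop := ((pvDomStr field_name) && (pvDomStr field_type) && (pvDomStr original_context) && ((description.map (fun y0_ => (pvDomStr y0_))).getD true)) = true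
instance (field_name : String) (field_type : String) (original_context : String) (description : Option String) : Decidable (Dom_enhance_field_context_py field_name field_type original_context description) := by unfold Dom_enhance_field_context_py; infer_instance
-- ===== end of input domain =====

-- B drops A's first-match elif ladder: it collects ALL keyword hits from one flat
-- keyword->priority map and keeps the min-priority one, looks the type hint up in a
-- dict, and builds the result string incrementally instead of join-over-filter.

-- ===== PORT A =====
def enhance_field_context_py (field_name : String) (field_type : String) (original_context : String) (description : Option String) : String :=
  let name_lower := PySem.Str.lower field_name
  let semantic_hints : List String :=
    if (["name", "namen", "vorname", "nachname"].any fun w => PySem.Str.isIn w name_lower) then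
      ["Look for person names, first/last names"]
    else if (["geburt", "birth", "geboren"].any fun w => PySem.Str.isIn w name_lower) then
      ["Look for birth dates, date of birth"]
    else if (["staat", "national", "citizenship"].any fun w => PySem.Str.isIn w name_lower) then
      ["Look for nationality, citizenship, country names"]
    else if (["arbeitgeber", "employer", "company", "firma"].any fun w => PySem.Str.isIn w name_lower) then
      ["Look for employer/company names and information"]
    else if (["adresse", "address", "wohnort"].any fun w => PySem.Str.isIn w name_lower) then
      ["Look for addresses, locations, postal codes"]
    else if (["telefon", "phone", "handy"].any fun w => PySem.Str.isIn w name_lower) then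
      ["Look for phone numbers, mobile numbers"]
    else if (["email", "e-mail", "mail"].any fun w => PySem.Str.isIn w name_lower) then
      ["Look for email addresses"]
    else if (["beruf", "job", "position", "titel"].any fun w => PySem.Str.isIn w name_lower) then
      ["Look for job titles, professions, positions"]
    else []
  let semantic_hints : List String :=
    if field_type == "date" then semantic_hints ++ ["Dates in formats: DD.MM.YYYY, DD/MM/YYYY, YYYY-MM-DD"]
    else if field_type == "number" then semantic_hints ++ ["Numeric values, amounts, quantities"]
    else if field_type == "email" then semantic_hints ++ ["Email addresses with @ symbol"]
    else if field_type == "phone" then semantic_hints ++ ["Phone numbers with country/area codes"]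
    else semantic_hints
  let contexts : List String := [original_context]
  let contexts : List String :=
    match description with
    | some d => if d = "" then contexts else contexts ++ ["Description: " ++ d]
    | none => contexts
  let contexts : List String :=
    if semantic_hints.isEmpty then contexts
    else contexts ++ ["Semantic hints: " ++ PySem.Str.join ", " semantic_hints]
  PySem.Str.join " | " (contexts.filter fun c => !(c == ""))

-- ===== PORT B =====
-- the flat keyword -> priority dict, in insertion order (all keys distinct)
def pvKwPriority : List (String × Nat) :=
  [ ("name", 0), ("namen", 0), ("vorname", 0), ("nachname", 0),
    ("geburt", 1), ("birth", 1), ("geboren", 1),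
    ("staat", 2), ("national", 2), ("citizenship", 2),
    ("arbeitgeber", 3), ("employer", 3), ("company", 3), ("firma", 3),
    ("adresse", 4), ("address", 4), ("wohnort", 4),
    ("telefon", 5), ("phone", 5), ("handy", 5),
    ("email", 6), ("e-mail", 6), ("mail", 6),
    ("beruf", 7), ("job", 7), ("position", 7), ("titel", 7) ]

def pvPriorityHint : List String :=
  [ "Look for person names, first/last names",
    "Look for birth dates, date of birth",
    "Look for nationality, citizenship, country names",
    "Look for employer/company names and information",
    "Look for addresses, locations, postal codes",
    "Look for phone numbers, mobile numbers",
    "Look for email addresses",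
    "Look for job titles, professions, positions" ]

def pvTypeHint : PySem.Dict String String :=
  PySem.Dict.ofList
    [ ("date", "Dates in formats: DD.MM.YYYY, DD/MM/YYYY, YYYY-MM-DD"),
      ("number", "Numeric values, amounts, quantities"),
      ("email", "Email addresses with @ symbol"),
      ("phone", "Phone numbers with country/area codes") ]

def pvBestHint (matched : List Nat) : List String :=
  match matched with
  | [] => []
  | m :: rest => [pvPriorityHint.getD (rest.foldl Nat.min m) ""]

def enhance_field_context_py_alt (field_name : String) (field_type : String) (original_context : String) (description : Option String) : String :=
  let name_lower := PySem.Str.lower field_name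
  -- matched = [p for kw, p in _KW_PRIORITY.items() if kw in name_lower]
  let matched : List Nat := pvKwPriority.filterMap fun kwp =>
    if PySem.Str.isIn kwp.1 name_lower then some kwp.2 else none
  -- hints = _best_hint(matched)
  let hints : List String := pvBestHint matched
  let hints : List String :=
    match pvTypeHint.get? field_type with
    | some t => hints ++ [t]
    | none => hints
  let result := original_context
  let result :=
    match description with
    | some d =>
      if d = "" then result
      else if result = "" then "Description: " ++ d
      else result ++ " | Description: " ++ d
    | none => result
  if hints.isEmpty then result
  else
    let tail := "Semantic hints: " ++ PySem.Str.join ", " hints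
    if result = "" then tail else result ++ " | " ++ tail

-- ===== PRECONDITION & SPEC =====
def Spec_enhance_field_context_py (field_name : String) (field_type : String) (original_context : String) (description : Option String) (out : String) : Prop := out = enhance_field_context_py_alt field_name field_type original_context description
instance (field_name : String) (field_type : String) (original_context : String) (description : Option String) (out : String) : Decidable (Spec_enhance_field_context_py field_name field_type original_context description out) := by unfold Spec_enhance_field_context_py; infer_instance

-- ===== CLAIM (what is proved, stated in full; the proofs are below) =====
def Claim_equal_enhance_field_context_py : Prop := ∀ (field_name : String) (field_type : String) (original_context : String) (description : Option String), Dom_enhance_field_context_py field_name field_type original_context description → Spec_enhance_field_context_py field_name field_type original_context description (enhance_field_context_py field_name field_type original_context description)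

-- ===== LEMMAS AND PROOFS =====

-- tagging a word list with a fixed priority and filtering gives a replicate block
theorem pv_seg_replicate (p : String → Bool) (i : Nat) : ∀ (ws : List String),
    (ws.map (fun w => (w, i))).filterMap
      (fun kwp => if p kwp.1 then some kwp.2 else none)
    = List.replicate (ws.countP p) i
  | [] => rfl
  | w :: ws => by
    by_cases h : p w = true <;>
      simp [h, pv_seg_replicate p i ws, List.replicate_succ]

-- folding min over a list all of whose elements dominate the seed leaves the seed
theorem pv_foldl_min (m : Nat) : ∀ (l : List Nat), (∀ x ∈ l, m ≤ x) →
    l.foldl Nat.min m = m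
  | [], _ => rfl
  | x :: l, h => by
    have hx : Nat.min m x = m := Nat.min_eq_left (h x (by simp))
    simpa [hx] using pv_foldl_min m l (fun y hy => h y (by simp [hy]))

theorem pv_any_of_countP_ne {p : String → Bool} {ws : List String}
    (h : ws.countP p ≠ 0) : ws.any p = true := by
  by_contra hc
  simp only [Bool.not_eq_true, List.any_eq_false] at hc
  exact h (List.countP_eq_zero.mpr (by simpa using hc))

theorem pv_not_any_of_countP_eq {p : String → Bool} {ws : List String}
    (h : ws.countP p = 0) : ws.any p = false := by
  rw [List.any_eq_false]; simpa using List.countP_eq_zero.mp h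

-- B's min-of-all-matches over the flat table equals A's first-match ladder
theorem pv_name_hints_eq (p : String → Bool) :
    pvBestHint (pvKwPriority.filterMap
        (fun kwp => if p kwp.1 then some kwp.2 else none)) =
    (if ["name", "namen", "vorname", "nachname"].any p then
      ["Look for person names, first/last names"]
    else if ["geburt", "birth", "geboren"].any p then
      ["Look for birth dates, date of birth"]
    else if ["staat", "national", "citizenship"].any p then
      ["Look for nationality, citizenship, country names"]
    else if ["arbeitgeber", "employer", "company", "firma"].any p then
      ["Look for employer/company names and information"]
    else if ["adresse", "address", "wohnort"].any p then
      ["Look for addresses, locations, postal codes"]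
    else if ["telefon", "phone", "handy"].any p then
      ["Look for phone numbers, mobile numbers"]
    else if ["email", "e-mail", "mail"].any p then
      ["Look for email addresses"]
    else if ["beruf", "job", "position", "titel"].any p then
      ["Look for job titles, professions, positions"]
    else []) := by
  have hflat : pvKwPriority =
      (["name", "namen", "vorname", "nachname"].map fun w => (w, (0 : Nat))) ++
      (["geburt", "birth", "geboren"].map fun w => (w, 1)) ++
      (["staat", "national", "citizenship"].map fun w => (w, 2)) ++
      (["arbeitgeber", "employer", "company", "firma"].map fun w => (w, 3)) ++
      (["adresse", "address", "wohnort"].map fun w => (w, 4)) ++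
      (["telefon", "phone", "handy"].map fun w => (w, 5)) ++
      (["email", "e-mail", "mail"].map fun w => (w, 6)) ++
      (["beruf", "job", "position", "titel"].map fun w => (w, 7)) := rfl
  unfold pvBestHint
  rw [hflat]
  simp only [List.filterMap_append, pv_seg_replicate]
  by_cases h0 : ["name", "namen", "vorname", "nachname"].countP p = 0
  case neg =>
    obtain ⟨k, hk⟩ := Nat.exists_eq_succ_of_ne_zero h0
    rw [hk]
    simp only [List.replicate_succ, List.cons_append]
    rw [pv_foldl_min]
    · simp [pv_any_of_countP_ne h0, pvPriorityHint]
    · intro x hx; simp [List.mem_replicate] at hx; omega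
  rw [h0]
  simp only [List.replicate_zero, List.nil_append]
  by_cases h1 : ["geburt", "birth", "geboren"].countP p = 0
  case neg =>
    obtain ⟨k, hk⟩ := Nat.exists_eq_succ_of_ne_zero h1
    rw [hk]
    simp only [List.replicate_succ, List.cons_append]
    rw [pv_foldl_min]
    · simp [pv_not_any_of_countP_eq h0, pv_any_of_countP_ne h1, pvPriorityHint]
    · intro x hx; simp [List.mem_replicate] at hx; omega
  rw [h1]
  simp only [List.replicate_zero, List.nil_append]
  by_cases h2 : ["staat", "national", "citizenship"].countP p = 0
  case neg =>
    obtain ⟨k, hk⟩ := Nat.exists_eq_succ_of_ne_zero h2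
    rw [hk]
    simp only [List.replicate_succ, List.cons_append]
    rw [pv_foldl_min]
    · simp [pv_not_any_of_countP_eq h0, pv_not_any_of_countP_eq h1, pv_any_of_countP_ne h2, pvPriorityHint]
    · intro x hx; simp [List.mem_replicate] at hx; omega
  rw [h2]
  simp only [List.replicate_zero, List.nil_append]
  by_cases h3 : ["arbeitgeber", "employer", "company", "firma"].countP p = 0
  case neg =>
    obtain ⟨k, hk⟩ := Nat.exists_eq_succ_of_ne_zero h3
    rw [hk]
    simp only [List.replicate_succ, List.cons_append]
    rw [pv_foldl_min]
    · simp [pv_not_any_of_countP_eq h0, pv_not_any_of_countP_eq h1, pv_not_any_of_countP_eq h2, pv_any_of_countP_ne h3, pvPriorityHint]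
    · intro x hx; simp [List.mem_replicate] at hx; omega
  rw [h3]
  simp only [List.replicate_zero, List.nil_append]
  by_cases h4 : ["adresse", "address", "wohnort"].countP p = 0
  case neg =>
    obtain ⟨k, hk⟩ := Nat.exists_eq_succ_of_ne_zero h4
    rw [hk]
    simp only [List.replicate_succ, List.cons_append]
    rw [pv_foldl_min]
    · simp [pv_not_any_of_countP_eq h0, pv_not_any_of_countP_eq h1, pv_not_any_of_countP_eq h2, pv_not_any_of_countP_eq h3, pv_any_of_countP_ne h4, pvPriorityHint]
    · intro x hx; simp [List.mem_replicate] at hx; omega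
  rw [h4]
  simp only [List.replicate_zero, List.nil_append]
  by_cases h5 : ["telefon", "phone", "handy"].countP p = 0
  case neg =>
    obtain ⟨k, hk⟩ := Nat.exists_eq_succ_of_ne_zero h5
    rw [hk]
    simp only [List.replicate_succ, List.cons_append]
    rw [pv_foldl_min]
    · simp [pv_not_any_of_countP_eq h0, pv_not_any_of_countP_eq h1, pv_not_any_of_countP_eq h2, pv_not_any_of_countP_eq h3, pv_not_any_of_countP_eq h4, pv_any_of_countP_ne h5, pvPriorityHint]
    · intro x hx; simp [List.mem_replicate] at hx; omega
  rw [h5]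
  simp only [List.replicate_zero, List.nil_append]
  by_cases h6 : ["email", "e-mail", "mail"].countP p = 0
  case neg =>
    obtain ⟨k, hk⟩ := Nat.exists_eq_succ_of_ne_zero h6
    rw [hk]
    simp only [List.replicate_succ, List.cons_append]
    rw [pv_foldl_min]
    · simp [pv_not_any_of_countP_eq h0, pv_not_any_of_countP_eq h1, pv_not_any_of_countP_eq h2, pv_not_any_of_countP_eq h3, pv_not_any_of_countP_eq h4, pv_not_any_of_countP_eq h5, pv_any_of_countP_ne h6, pvPriorityHint]
    · intro x hx; simp [List.mem_replicate] at hx; omega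
  rw [h6]
  simp only [List.replicate_zero, List.nil_append]
  by_cases h7 : ["beruf", "job", "position", "titel"].countP p = 0
  case neg =>
    obtain ⟨k, hk⟩ := Nat.exists_eq_succ_of_ne_zero h7
    rw [hk]
    simp only [List.replicate_succ]
    rw [pv_foldl_min]
    · simp [pv_not_any_of_countP_eq h0, pv_not_any_of_countP_eq h1, pv_not_any_of_countP_eq h2, pv_not_any_of_countP_eq h3, pv_not_any_of_countP_eq h4, pv_not_any_of_countP_eq h5, pv_not_any_of_countP_eq h6, pv_any_of_countP_ne h7, pvPriorityHint]
    · intro x hx; simp [List.mem_replicate] at hx; omega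
  rw [h7]
  simp only [List.replicate_zero]
  simp [pv_not_any_of_countP_eq h0, pv_not_any_of_countP_eq h1, pv_not_any_of_countP_eq h2, pv_not_any_of_countP_eq h3, pv_not_any_of_countP_eq h4, pv_not_any_of_countP_eq h5, pv_not_any_of_countP_eq h6, pv_not_any_of_countP_eq h7]

-- specialization of pv_name_hints_eq to the membership predicate the ports use
theorem pv_name_hints_eq' (nl : String) :
    pvBestHint (pvKwPriority.filterMap
        (fun kwp => if PySem.Str.isIn kwp.1 nl then some kwp.2 else none)) =
    (if (["name", "namen", "vorname", "nachname"].any fun w => PySem.Str.isIn w nl) then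
      ["Look for person names, first/last names"]
    else if (["geburt", "birth", "geboren"].any fun w => PySem.Str.isIn w nl) then
      ["Look for birth dates, date of birth"]
    else if (["staat", "national", "citizenship"].any fun w => PySem.Str.isIn w nl) then
      ["Look for nationality, citizenship, country names"]
    else if (["arbeitgeber", "employer", "company", "firma"].any fun w => PySem.Str.isIn w nl) then
      ["Look for employer/company names and information"]
    else if (["adresse", "address", "wohnort"].any fun w => PySem.Str.isIn w nl) then
      ["Look for addresses, locations, postal codes"]
    else if (["telefon", "phone", "handy"].any fun w => PySem.Str.isIn w nl) then
      ["Look for phone numbers, mobile numbers"]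
    else if (["email", "e-mail", "mail"].any fun w => PySem.Str.isIn w nl) then
      ["Look for email addresses"]
    else if (["beruf", "job", "position", "titel"].any fun w => PySem.Str.isIn w nl) then
      ["Look for job titles, professions, positions"]
    else []) :=
  pv_name_hints_eq (fun w => PySem.Str.isIn w nl)

-- B's dict lookup is A's type elif ladder
theorem pv_type_eq_ladder (ft : String) (hints : List String) :
    (match pvTypeHint.get? ft with
     | some t => hints ++ [t]
     | none => hints) =
    (if ft == "date" then hints ++ ["Dates in formats: DD.MM.YYYY, DD/MM/YYYY, YYYY-MM-DD"]
     else if ft == "number" then hints ++ ["Numeric values, amounts, quantities"]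
     else if ft == "email" then hints ++ ["Email addresses with @ symbol"]
     else if ft == "phone" then hints ++ ["Phone numbers with country/area codes"]
     else hints) := by
  by_cases h1 : ft = "date"
  · subst h1; rfl
  by_cases h2 : ft = "number"
  · subst h2; rfl
  by_cases h3 : ft = "email"
  · subst h3; rfl
  by_cases h4 : ft = "phone"
  · subst h4; rfl
  simp [pvTypeHint, PySem.Dict.ofList, PySem.Dict.update, PySem.Dict.get?_insert,
    PySem.Dict.get?_empty, h1, h2, h3, h4]

theorem pv_ne_empty (pre s : String) (h : pre.toList ≠ []) : ¬ (pre ++ s = "") := by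
  intro he
  have := congrArg String.toList he
  rw [String.toList_append] at this
  exact h (List.append_eq_nil_iff.mp this).1

theorem pv_join_singleton (a : String) : PySem.Str.join " | " [a] = a := by
  simp [PySem.Str.join]

theorem pv_join_pair (a b : String) : PySem.Str.join " | " [a, b] = a ++ " | " ++ b := by
  simp [PySem.Str.join]
  rw [PySem.Chars.join_cons_cons, PySem.Chars.join_singleton, ← String.toList_inj]
  simp [String.toList_append]

theorem pv_join_triple (a b c : String) :
    PySem.Str.join " | " [a, b, c] = (a ++ " | " ++ b) ++ " | " ++ c := by
  simp [PySem.Str.join]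
  rw [PySem.Chars.join_cons_cons, PySem.Chars.join_cons_cons, PySem.Chars.join_singleton,
    ← String.toList_inj]
  simp [String.toList_append]

theorem pv_join_nil : PySem.Str.join " | " [] = "" := by
  simp [PySem.Str.join]

-- A's join-over-filter assembly equals B's incremental build (hint parts never empty)
theorem pv_assembly_eq (oc : String) (d : Option String) (hints : List String) :
    (let contexts : List String := [oc]
     let contexts : List String :=
       match d with
       | some s => if s = "" then contexts else contexts ++ ["Description: " ++ s]
       | none => contexts
     let contexts : List String :=
       if hints.isEmpty then contexts
       else contexts ++ ["Semantic hints: " ++ PySem.Str.join ", " hints]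
     PySem.Str.join " | " (contexts.filter fun c => !(c == ""))) =
    (let result := oc
     let result :=
       match d with
       | some s =>
         if s = "" then result
         else if result = "" then "Description: " ++ s
         else result ++ " | Description: " ++ s
       | none => result
     if hints.isEmpty then result
     else
       let tail := "Semantic hints: " ++ PySem.Str.join ", " hints
       if result = "" then tail else result ++ " | " ++ tail) := by
  have hD : ∀ s : String, ¬ ("Description: " ++ s = "") :=
    fun s => pv_ne_empty _ s (by decide)
  have hS : ¬ ("Semantic hints: " ++ PySem.Str.join ", " hints = "") :=
    pv_ne_empty _ _ (by decide)
  have hocd : ∀ s : String, oc ++ " | Description: " ++ s = oc ++ " | " ++ ("Description: " ++ s) := by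
    intro s
    rw [← String.toList_inj]
    simp [String.toList_append]
  rcases d with _ | s
  · by_cases he : hints.isEmpty
    · by_cases hoc : oc = "" <;>
        simp [he, hoc, pv_join_singleton, pv_join_nil]
    · by_cases hoc : oc = "" <;>
        simp [he, hoc, hS, pv_join_singleton, pv_join_pair]
  · by_cases hs : s = ""
    · by_cases he : hints.isEmpty
      · by_cases hoc : oc = "" <;>
          simp [hs, he, hoc, pv_join_singleton, pv_join_nil]
      · by_cases hoc : oc = "" <;>
          simp [hs, he, hoc, hS, pv_join_singleton, pv_join_pair]
    · by_cases he : hints.isEmpty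
      · by_cases hoc : oc = "" <;>
          simp [hs, he, hoc, hD, pv_join_singleton, pv_join_pair, hocd]
      · by_cases hoc : oc = "" <;>
          simp [hs, he, hoc, hD, hS, pv_join_pair, pv_join_triple, hocd]

-- ===== VERDICT (by name: the statement is the Claim_ definition above) =====
theorem enhance_field_context_py_spec : Claim_equal_enhance_field_context_py := by
  intro fn ft oc d _
  unfold Spec_enhance_field_context_py enhance_field_context_py enhance_field_context_py_alt
  simp only [pv_name_hints_eq', pv_type_eq_ladder, pv_assembly_eq]
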